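-- pv_equiv track=rewrite | github.com/baharak/yelp-reviews | step2.py | create_wordbag
-- ===== SOURCE A (Python) =====
-- from collections import defaultdict
--
-- def create_wordbag(review, most_freq):
--     wordbag = defaultdict(int)
--     for word in most_freq:
--         wordbag[word] = 0
--     for word in review:
--         if word in most_freq:
--             wordbag[word] = 1
--     return wordbag
-- ===== SOURCE B (Python) =====
-- from collections import defaultdict
--
-- def create_wordbag(review, most_freq):
--     review_set = set(review)
--     wordbag = defaultdict(int)
--     for word in most_freq:
--         wordbag[word] = 1 if word in review_set else 0
--     return wordbag
-- ===== Notes on version B (the rewrite author's own statement) =====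
-- stated objective: alternative
-- what changed: B builds a set of the review words once and fills the dict in a single pass over most_freq, replacing A's zero-init pass plus a review loop with a linear 'in most_freq' membership test inside it.
import Mathlib
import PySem

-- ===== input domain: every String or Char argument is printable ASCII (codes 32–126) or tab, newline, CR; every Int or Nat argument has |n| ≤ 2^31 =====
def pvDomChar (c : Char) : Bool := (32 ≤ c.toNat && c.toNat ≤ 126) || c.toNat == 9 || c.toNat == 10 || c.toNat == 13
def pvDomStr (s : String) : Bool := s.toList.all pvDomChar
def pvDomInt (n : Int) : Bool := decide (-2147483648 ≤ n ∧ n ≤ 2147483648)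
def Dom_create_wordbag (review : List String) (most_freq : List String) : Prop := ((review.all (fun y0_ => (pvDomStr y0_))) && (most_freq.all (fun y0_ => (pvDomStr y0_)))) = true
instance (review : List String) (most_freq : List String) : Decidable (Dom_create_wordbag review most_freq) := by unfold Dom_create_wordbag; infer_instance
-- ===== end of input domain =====

-- B replaces A's zero-init pass plus a review loop (with a linear 'in most_freq' test) by one
-- pass over most_freq against a set of the review words; equivalence of the returned dict is proved.

-- ===== PORT A =====
def create_wordbag (review : List String) (most_freq : List String) : List (String × Int) :=
  -- wordbag = defaultdict(int); for word in most_freq: wordbag[word] = 0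
  let wordbag : PySem.Dict String Int :=
    most_freq.foldl (fun d word => d.insert word 0) PySem.Dict.empty
  -- for word in review: if word in most_freq: wordbag[word] = 1
  let wordbag :=
    review.foldl (fun d word => if most_freq.contains word then d.insert word 1 else d) wordbag
  wordbag.items

-- ===== PORT B =====
def create_wordbag_alt (review : List String) (most_freq : List String) : List (String × Int) :=
  -- review_set = set(review)
  let review_set : PySem.Set String := PySem.Set.ofList review
  -- wordbag = defaultdict(int); for word in most_freq: wordbag[word] = 1 if word in review_set else 0
  let wordbag : PySem.Dict String Int :=
    most_freq.foldl (fun d word => d.insert word (if review_set.contains word then 1 else 0))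
      PySem.Dict.empty
  wordbag.items

-- ===== PRECONDITION & SPEC =====
def Spec_create_wordbag (review : List String) (most_freq : List String) (out : List (String × Int)) : Prop := out = create_wordbag_alt review most_freq
instance (review : List String) (most_freq : List String) (out : List (String × Int)) : Decidable (Spec_create_wordbag review most_freq out) := by unfold Spec_create_wordbag; infer_instance

-- ===== CLAIM (what is proved, stated in full; the proofs are below) =====
def Claim_equal_create_wordbag : Prop := ∀ (review : List String) (most_freq : List String), Dom_create_wordbag review most_freq → Spec_create_wordbag review most_freq (create_wordbag review most_freq)

-- ===== LEMMAS AND PROOFS =====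

-- A's second loop only rewrites values in place: its effect on the items list is a map.
lemma items_update_loop (most_freq : List String) :
    ∀ (review : List String) (d : PySem.Dict String Int),
      (∀ w, most_freq.contains w = true → d.contains w = true) →
      (review.foldl (fun d word => if most_freq.contains word then d.insert word 1 else d) d).items
        = d.items.map (fun p =>
            if review.contains p.1 && most_freq.contains p.1 then (p.1, (1 : Int)) else p) := by
  intro review
  induction review with
  | nil => intro d _; simp
  | cons w rest ih =>
    intro d hd
    simp only [List.foldl_cons]
    by_cases hw : most_freq.contains w = true
    · rw [hw, if_pos rfl,
        ih (d.insert w 1) (fun x hx => by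
          rw [PySem.Dict.contains_insert]
          simp [hd x hx]),
        PySem.Dict.items_insert_of_contains d 1 (hd w hw), List.map_map]
      apply List.map_congr_left
      intro p _
      simp only [Function.comp]
      by_cases hpw : p.1 = w
      · subst hpw
        have hmem : p.1 ∈ most_freq := by simpa using hw
        simp [hmem]
      · have hbeq : (p.1 == w) = false := by simp [hpw]
        simp [hbeq, hpw]
    · have hw' : w ∉ most_freq := by simpa using hw
      rw [if_neg (by simpa using hw'), ih d hd]
      apply List.map_congr_left
      intro p _
      by_cases hpw : p.1 = w
      · subst hpw; simp [hw']
      · simp [hpw]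

-- Value stored by an insert loop whose value depends only on the key.
lemma getD_insert_loop (f : String → Int) :
    ∀ (ws : List String) (d : PySem.Dict String Int) (k : String),
      (ws.foldl (fun d w => d.insert w (f w)) d).getD k 0
        = if ws.contains k then f k else d.getD k 0 := by
  intro ws
  induction ws with
  | nil => intro d k; simp
  | cons w rest ih =>
    intro d k
    simp only [List.foldl_cons, ih, PySem.Dict.getD_insert, List.contains_cons]
    by_cases hk : k ∈ rest
    · simp [hk]
    · by_cases hkw : k = w
      · subst hkw; simp [hk]
      · simp [hk, hkw]

-- Keys of an insert loop from empty do not depend on the values written.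
lemma keys_insert_loop (f g : PySem.Dict String Int → String → Int) (ws : List String) :
    (ws.foldl (fun d w => d.insert w (f d w)) PySem.Dict.empty).keys
      = (ws.foldl (fun d w => d.insert w (g d w)) PySem.Dict.empty).keys := by
  rw [PySem.Dict.keys_foldl_insert, PySem.Dict.keys_foldl_insert]

-- ===== VERDICT (by name: the statement is the Claim_ definition above) =====
theorem create_wordbag_spec : Claim_equal_create_wordbag := by
  intro review most_freq _
  unfold Spec_create_wordbag create_wordbag create_wordbag_alt
  simp only []
  set d1 : PySem.Dict String Int :=
    most_freq.foldl (fun d word => d.insert word 0) PySem.Dict.empty with hd1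
  set dB : PySem.Dict String Int :=
    most_freq.foldl
      (fun d word => d.insert word (if (PySem.Set.ofList review).contains word then 1 else 0))
      PySem.Dict.empty with hdB
  have hnd1 : d1.keys.Nodup := by
    rw [hd1]; exact PySem.Dict.nodup_keys_foldl_insert _ _ _ (by simp)
  have hndB : dB.keys.Nodup := by
    rw [hdB]; exact PySem.Dict.nodup_keys_foldl_insert _ _ _ (by simp)
  have hkeys : d1.keys = dB.keys := by
    rw [hd1, hdB]
    exact keys_insert_loop (fun _ _ => 0)
      (fun _ w => if (PySem.Set.ofList review).contains w then 1 else 0) most_freq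
  have hmemkeys : ∀ k, k ∈ d1.keys → most_freq.contains k = true := by
    intro k hk
    rw [hd1, PySem.Dict.keys_foldl_insert] at hk
    simp only [PySem.Dict.keys_empty] at hk
    rw [PySem.Set.mem_update] at hk
    have : k ∈ most_freq := by
      rcases hk with h | h
      · simp [PySem.Set] at h
      · exact h
    simpa using this
  have hd1c : ∀ w, most_freq.contains w = true → d1.contains w = true := by
    intro w hw
    rw [PySem.Dict.contains_iff_mem_keys, hd1, PySem.Dict.keys_foldl_insert]
    rw [PySem.Set.mem_update]
    right; simpa using hw
  rw [items_update_loop most_freq review d1 hd1c,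
      PySem.Dict.items_eq_map_keys d1 hnd1 0, PySem.Dict.items_eq_map_keys dB hndB 0,
      List.map_map, ← hkeys]
  apply List.map_congr_left
  intro k hk
  have hkmf := hmemkeys k hk
  have hvd1 : d1.getD k 0 = 0 := by
    rw [hd1, getD_insert_loop (fun _ => 0) most_freq PySem.Dict.empty k]
    simp
  have hvdB : dB.getD k 0 = if (PySem.Set.ofList review).contains k then 1 else 0 := by
    rw [hdB, getD_insert_loop _ most_freq PySem.Dict.empty k, if_pos hkmf]
  have hrev : (PySem.Set.ofList review).contains k = review.contains k := by
    simp [PySem.Set.mem_ofList]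
  simp only [Function.comp, hvd1, hvdB, hkmf, Bool.and_true, hrev]
  split <;> rfl
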